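-- pv_equiv track=rewrite | github.com/CNLarrylai/MB2-ML-trasnaltion | overwrite all files replace with id.py | replace_id
-- ===== SOURCE A (Python) =====
-- def replace_id(_string):
--     index_left = _string.index('}')
--     temp= _string[index_left + 1:].replace(" ","_")
--     for r in ((" ", "_"), ("'", "_"),(":", "_"),(")", "_"),("(", "_")):
--         temp = temp.replace(*r)
--         temp = temp.replace("\"","")
--         temp = temp.replace("\n", "")
--     return temp.lower()
-- ===== SOURCE B (Python) =====
-- def replace_id(_string):
--     index_left = _string.index('}')
--     out = []
--     for ch in _string[index_left + 1:]:
--         if ch in " ':)(":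
--             out.append('_')
--         elif ch not in '"\n':
--             out.append(ch.lower())
--     return ''.join(out)
-- ===== Notes on version B (the rewrite author's own statement) =====
-- stated objective: simpler
-- what changed: A runs seven sequential whole-string str.replace scans (several repeated) and a final lower(); B makes one pass over the suffix after '}', mapping each character (punctuation to '_', dropping quote/newline, lowercasing the rest) into an output list.
import Mathlib
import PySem

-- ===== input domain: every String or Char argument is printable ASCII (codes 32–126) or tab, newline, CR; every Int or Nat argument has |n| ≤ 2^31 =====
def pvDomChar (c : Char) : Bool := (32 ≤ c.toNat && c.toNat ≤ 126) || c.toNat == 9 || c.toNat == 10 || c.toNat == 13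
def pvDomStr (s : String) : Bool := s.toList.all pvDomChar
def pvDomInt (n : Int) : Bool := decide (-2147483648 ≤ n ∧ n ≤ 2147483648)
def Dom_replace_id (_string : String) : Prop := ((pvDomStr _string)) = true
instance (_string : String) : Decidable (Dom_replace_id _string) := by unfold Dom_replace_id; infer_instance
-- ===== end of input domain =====

-- B replaces A's seven sequential str.replace scans by one character-at-a-time pass
-- appending each character's mapped replacement (objective: simpler, one traversal).

-- ===== PORT A =====
def replace_id (_string : String) : String :=
  -- index_left = _string.index('}')  (ValueError when '}' is absent: excluded by Pre_)
  let indexLeft := PySem.Str.find _string "}"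
  -- temp = _string[index_left + 1:].replace(" ", "_")
  let temp := PySem.Str.replace (PySem.Str.slice _string (some (indexLeft + 1)) none) " " "_"
  -- for r in ((" ","_"),("'","_"),(":","_"),(")","_"),("(","_")): …
  let temp := [(" ", "_"), ("'", "_"), (":", "_"), (")", "_"), ("(", "_")].foldl
    (fun t (r : String × String) =>
      let t := PySem.Str.replace t r.1 r.2
      let t := PySem.Str.replace t "\"" ""
      PySem.Str.replace t "\n" "") temp
  PySem.Str.lower temp

-- ===== PORT B =====
-- per-character mapping of B's loop body: '_' for punctuation, drop '"'/newline, lowercase the rest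
def pvMapChar (c : Char) : Option Char :=
  if " ':)(".toList.contains c then some '_'
  else if !("\"\n".toList.contains c) then some (PySem.Chars.lowerChar c)
  else none

def replace_id_alt (_string : String) : String :=
  let indexLeft := PySem.Str.find _string "}"
  String.ofList ((PySem.Str.slice _string (some (indexLeft + 1)) none).toList.filterMap pvMapChar)

-- ===== PRECONDITION & SPEC =====
-- Pre_ excludes exactly the strings without '}', on which A's .index raises ValueError.
def Pre_replace_id (_string : String) : Prop := PySem.Str.isIn "}" _string = true
instance (_string : String) : Decidable (Pre_replace_id _string) := by unfold Pre_replace_id; infer_instance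
def pvWitness_replace_id : String := "{A}B C'd\"e"

def Spec_replace_id (_string : String) (out : String) : Prop := out = replace_id_alt _string
instance (_string : String) (out : String) : Decidable (Spec_replace_id _string out) := by unfold Spec_replace_id; infer_instance

-- ===== CLAIM (what is proved, stated in full; the proofs are below) =====
def Claim_equal_replace_id : Prop := ∀ (_string : String), Dom_replace_id _string → Pre_replace_id _string → Spec_replace_id _string (replace_id _string)

-- ===== LEMMAS AND PROOFS =====

-- single-character replacement acts independently on each character
def pvSub (a : Char) (new : List Char) : Char → List Char := fun c => if c = a then new else [c]

theorem pv_go_single (a : Char) (new : List Char) :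
    ∀ (l : List Char) (fuel : Nat) (acc : List Char), l.length ≤ fuel →
      PySem.Chars.replace.go [a] new fuel l acc = acc.reverse ++ l.flatMap (pvSub a new) := by
  intro l
  induction l with
  | nil =>
    intro fuel acc _
    cases fuel <;> simp [PySem.Chars.replace.go]
  | cons c t ih =>
    intro fuel acc h
    cases fuel with
    | zero => simp at h
    | succ f =>
      have hlen : t.length ≤ f := by simpa using h
      by_cases hc : c = a
      · subst hc
        have hpre : [c].isPrefixOf (c :: t) = true := by simp [List.isPrefixOf]
        simp only [PySem.Chars.replace.go, hpre, if_true]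
        have hd : List.drop ([c].length) (c :: t) = t := by simp
        rw [hd, ih f (new.reverse ++ acc) hlen]
        simp [pvSub]
      · have hpre : [a].isPrefixOf (c :: t) = false := by
          simp [List.isPrefixOf]
          exact fun h' => hc h'.symm
        simp only [PySem.Chars.replace.go, hpre, Bool.false_eq_true, if_false]
        rw [ih f (c :: acc) hlen]
        simp [pvSub, hc]

theorem pv_replace_single (l : List Char) (a : Char) (new : List Char) :
    PySem.Chars.replace l [a] new = l.flatMap (pvSub a new) := by
  have he : ([a] : List Char).isEmpty = false := rfl
  rw [PySem.Chars.replace, he]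
  simpa using pv_go_single a new l l.length [] le_rfl

-- A's full chain of per-character substitutions followed by lowercasing
def pvChain (l : List Char) : List Char :=
  ((((((((((((((((l.flatMap (pvSub ' ' ['_'])).flatMap (pvSub ' ' ['_'])).flatMap
    (pvSub '"' [])).flatMap (pvSub '\n' [])).flatMap (pvSub '\'' ['_'])).flatMap
    (pvSub '"' [])).flatMap (pvSub '\n' [])).flatMap (pvSub ':' ['_'])).flatMap
    (pvSub '"' [])).flatMap (pvSub '\n' [])).flatMap (pvSub ')' ['_'])).flatMap
    (pvSub '"' [])).flatMap (pvSub '\n' [])).flatMap (pvSub '(' ['_'])).flatMap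
    (pvSub '"' [])).flatMap (pvSub '\n' [])).map PySem.Chars.lowerChar

-- the chain's effect on one character is exactly B's pvMapChar
theorem pv_chain_singleton (c : Char) : pvChain [c] = (pvMapChar c).toList := by
  unfold pvChain pvMapChar
  by_cases h1 : c = ' '
  · subst h1; decide
  all_goals by_cases h2 : c = '\''
  case pos => subst h2; decide
  all_goals by_cases h3 : c = ':'
  case pos => subst h3; decide
  all_goals by_cases h4 : c = ')'
  case pos => subst h4; decide
  all_goals by_cases h5 : c = '('
  case pos => subst h5; decide
  all_goals by_cases h6 : c = '"'
  case pos => subst h6; decide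
  all_goals by_cases h7 : c = '\n'
  case pos => subst h7; decide
  · simp [pvSub, h1, h2, h3, h4, h5, h6, h7, List.contains_eq_mem,
      show (" ':)(".toList : List Char) = [' ', '\'', ':', ')', '('] from rfl,
      show ("\"\n".toList : List Char) = ['"', '\n'] from rfl]

theorem pv_chain_cons (c : Char) (t : List Char) :
    pvChain (c :: t) = pvChain [c] ++ pvChain t := by
  unfold pvChain
  simp [List.flatMap_append, List.map_append]

theorem pv_chain_eq (l : List Char) : pvChain l = l.filterMap pvMapChar := by
  induction l with
  | nil => rfl
  | cons c t ih =>
    rw [pv_chain_cons, pv_chain_singleton, ih, List.filterMap_cons]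
    cases pvMapChar c <;> simp

-- ===== VERDICT (by name: the statement is the Claim_ definition above) =====
theorem replace_id_spec : Claim_equal_replace_id := by
  intro s _ _
  unfold Spec_replace_id replace_id replace_id_alt
  apply String.toList_inj.mp
  simp only [List.foldl_cons, List.foldl_nil, PySem.Str.toList_lower, PySem.Str.toList_replace,
    String.toList_ofList]
  have := pv_chain_eq (PySem.Str.slice s (some (PySem.Str.find s "}" + 1)) none).toList
  unfold pvChain at this
  simpa only [show (" ".toList : List Char) = [' '] from rfl,
    show ("_".toList : List Char) = ['_'] from rfl,
    show ("'".toList : List Char) = ['\''] from rfl,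
    show (":".toList : List Char) = [':'] from rfl,
    show (")".toList : List Char) = [')'] from rfl,
    show ("(".toList : List Char) = ['('] from rfl,
    show ("\"".toList : List Char) = ['"'] from rfl,
    show ("\n".toList : List Char) = ['\n'] from rfl,
    show ("".toList : List Char) = ([] : List Char) from rfl,
    pv_replace_single, PySem.Chars.lower] using this
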